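-- pv_equiv track=rewrite | github.com/schibb-dev/comfyui-runpod | workspace/scripts/workflow_litegraph_health.py | classify_disconnected_nodes
-- ===== SOURCE A (Python) =====
-- from typing import Any
--
-- WARN_IF_DISCONNECTED_TYPES: frozenset[str] = frozenset(
--     {
--         "KSampler",
--         "KSamplerAdvanced",
--         "RandomNoise",
--         "EmptyLatentImage",
--         "CLIPTextEncode",
--         "Sampler",
--         "SamplerCustom",
--         "SamplerCustomAdvanced",
--     }
-- )
--
-- LOW_PRIORITY_DISCONNECTED_TYPES: frozenset[str] = frozenset(
--     {
--         "Note",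
--         "MarkdownNote",
--     }
-- )
--
-- def classify_disconnected_nodes(
--     rows: list[dict[str, Any]],
-- ) -> tuple[list[dict[str, Any]], list[dict[str, Any]], list[dict[str, Any]]]:
--     """Split into (warn, low_priority, other)."""
--     warn: list[dict[str, Any]] = []
--     low: list[dict[str, Any]] = []
--     other: list[dict[str, Any]] = []
--     for r in rows:
--         t = r["type"]
--         if t in WARN_IF_DISCONNECTED_TYPES:
--             warn.append(r)
--         elif t in LOW_PRIORITY_DISCONNECTED_TYPES:
--             low.append(r)
--         else:
--             other.append(r)
--     return warn, low, other
-- ===== SOURCE B (Python) =====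
-- # B: three independent list comprehensions (full scans) instead of one accumulating loop.
-- WARN_IF_DISCONNECTED_TYPES = frozenset({
--     "KSampler", "KSamplerAdvanced", "RandomNoise", "EmptyLatentImage",
--     "CLIPTextEncode", "Sampler", "SamplerCustom", "SamplerCustomAdvanced",
-- })
-- LOW_PRIORITY_DISCONNECTED_TYPES = frozenset({"Note", "MarkdownNote"})
--
-- def classify_disconnected_nodes(rows):
--     warn = [r for r in rows if r["type"] in WARN_IF_DISCONNECTED_TYPES]
--     low = [r for r in rows if r["type"] in LOW_PRIORITY_DISCONNECTED_TYPES]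
--     other = [r for r in rows
--              if r["type"] not in WARN_IF_DISCONNECTED_TYPES
--              and r["type"] not in LOW_PRIORITY_DISCONNECTED_TYPES]
--     return warn, low, other
-- ===== Notes on version B (the rewrite author's own statement) =====
-- stated objective: idiomatic
-- what changed: Replaces the single loop that pushes each row into one of three accumulators with three independent list comprehensions, each a full filtering scan of rows.
import Mathlib
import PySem

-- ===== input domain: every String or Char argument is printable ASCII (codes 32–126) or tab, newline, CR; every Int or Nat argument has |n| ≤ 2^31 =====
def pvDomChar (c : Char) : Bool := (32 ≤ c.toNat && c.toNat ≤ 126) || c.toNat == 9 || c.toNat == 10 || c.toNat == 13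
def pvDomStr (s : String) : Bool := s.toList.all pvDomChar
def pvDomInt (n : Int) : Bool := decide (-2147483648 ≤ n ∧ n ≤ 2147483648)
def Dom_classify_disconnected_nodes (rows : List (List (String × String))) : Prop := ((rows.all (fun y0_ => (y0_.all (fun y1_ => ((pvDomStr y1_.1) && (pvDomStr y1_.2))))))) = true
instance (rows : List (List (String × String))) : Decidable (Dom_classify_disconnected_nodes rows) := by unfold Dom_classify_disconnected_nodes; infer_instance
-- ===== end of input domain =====

-- B replaces A's single three-accumulator loop with three independent filtering scans (idiomatic decomposition; same cost).
-- Equivalence is about the return value only (neither version mutates its argument).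

-- ===== PORT A =====
def warnTypes : List String :=
  ["KSampler", "KSamplerAdvanced", "RandomNoise", "EmptyLatentImage",
   "CLIPTextEncode", "Sampler", "SamplerCustom", "SamplerCustomAdvanced"]

def lowTypes : List String := ["Note", "MarkdownNote"]

-- r["type"] : first match in the row's association list; Pre_ guarantees the key is present, so getD's default is never used.
def rowType (r : List (String × String)) : String := (PySem.Dict.mk r).getD "type" ""

def classify_disconnected_nodes (rows : List (List (String × String))) : (List (List (String × String))) × (List (List (String × String))) × (List (List (String × String))) :=
  rows.foldl
    (fun acc r =>
      let t := rowType r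
      if warnTypes.contains t then (acc.1 ++ [r], acc.2.1, acc.2.2)
      else if lowTypes.contains t then (acc.1, acc.2.1 ++ [r], acc.2.2)
      else (acc.1, acc.2.1, acc.2.2 ++ [r]))
    ([], [], [])

-- ===== PORT B =====
def classify_disconnected_nodes_alt (rows : List (List (String × String))) : (List (List (String × String))) × (List (List (String × String))) × (List (List (String × String))) :=
  (rows.filter (fun r => warnTypes.contains (rowType r)),
   rows.filter (fun r => lowTypes.contains (rowType r)),
   rows.filter (fun r => !warnTypes.contains (rowType r) && !lowTypes.contains (rowType r)))

-- ===== PRECONDITION & SPEC =====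
-- Pre_ excludes rows without a "type" key: there the Python A raises KeyError (no value is returned).
def Pre_classify_disconnected_nodes (rows : List (List (String × String))) : Prop :=
  ∀ r ∈ rows, (PySem.Dict.mk r).contains "type" = true
instance (rows : List (List (String × String))) : Decidable (Pre_classify_disconnected_nodes rows) := by unfold Pre_classify_disconnected_nodes; infer_instance

def pvWitness_classify_disconnected_nodes : (List (List (String × String))) :=
  [[("type", "KSampler"), ("id", "1")], [("type", "Note")], [("type", "Foo")]]

def Spec_classify_disconnected_nodes (rows : List (List (String × String))) (out : (List (List (String × String))) × (List (List (String × String))) × (List (List (String × String)))) : Prop := out = classify_disconnected_nodes_alt rows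
instance (rows : List (List (String × String))) (out : (List (List (String × String))) × (List (List (String × String))) × (List (List (String × String)))) : Decidable (Spec_classify_disconnected_nodes rows out) := by unfold Spec_classify_disconnected_nodes; infer_instance

-- ===== CLAIM (what is proved, stated in full; the proofs are below) =====
def Claim_equal_classify_disconnected_nodes : Prop := ∀ (rows : List (List (String × String))), Dom_classify_disconnected_nodes rows → Pre_classify_disconnected_nodes rows → Spec_classify_disconnected_nodes rows (classify_disconnected_nodes rows)

-- ===== LEMMAS AND PROOFS =====
-- A's loop body, named so the induction can rewrite it
def clStep (acc : (List (List (String × String))) × (List (List (String × String))) × (List (List (String × String)))) (r : List (String × String)) : (List (List (String × String))) × (List (List (String × String))) × (List (List (String × String))) :=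
  let t := rowType r
  if warnTypes.contains t then (acc.1 ++ [r], acc.2.1, acc.2.2)
  else if lowTypes.contains t then (acc.1, acc.2.1 ++ [r], acc.2.2)
  else (acc.1, acc.2.1, acc.2.2 ++ [r])

theorem classify_eq_foldl_clStep (rows : List (List (String × String))) :
    classify_disconnected_nodes rows = rows.foldl clStep ([], [], []) := rfl

-- the two type sets are disjoint
theorem warn_not_low (t : String) (h : t ∈ warnTypes) : t ∉ lowTypes := by
  simp [warnTypes] at h
  rcases h with h | h | h | h | h | h | h | h <;> subst h <;> decide

theorem foldl_classify (rows : List (List (String × String)))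
    (w l o : List (List (String × String))) :
    rows.foldl clStep (w, l, o)
    = (w ++ rows.filter (fun r => warnTypes.contains (rowType r)),
       l ++ rows.filter (fun r => lowTypes.contains (rowType r)),
       o ++ rows.filter (fun r => !warnTypes.contains (rowType r) && !lowTypes.contains (rowType r))) := by
  induction rows generalizing w l o with
  | nil => simp
  | cons r rs ih =>
    rw [List.foldl_cons]
    by_cases hw : rowType r ∈ warnTypes
    · rw [show clStep (w, l, o) r = (w ++ [r], l, o) by simp [clStep, hw], ih]
      simp [hw, warn_not_low _ hw]
    · by_cases hl : rowType r ∈ lowTypes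
      · rw [show clStep (w, l, o) r = (w, l ++ [r], o) by
          simp [clStep, hw, hl], ih]
        simp [hw, hl]
      · rw [show clStep (w, l, o) r = (w, l, o ++ [r]) by
          simp [clStep, hw, hl], ih]
        simp [hw, hl]

-- ===== VERDICT (by name: the statement is the Claim_ definition above) =====
theorem classify_disconnected_nodes_spec : Claim_equal_classify_disconnected_nodes := by
  intro rows _ _
  unfold Spec_classify_disconnected_nodes classify_disconnected_nodes_alt
  rw [classify_eq_foldl_clStep, foldl_classify]
  simp
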